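-- pv_equiv track=rewrite | github.com/Ezzh/MireaPython | 1/task3.py | find_same_word
-- ===== SOURCE A (Python) =====
-- def find_same_word(word: str, wordlist: list):
--     same_letters = 0
--     dictionary = {}
--     for i in range(len(wordlist)):
--         for letter in range(min(len(wordlist[i]), len(word))):
--             if wordlist[i][letter] == word[letter]:
--                 same_letters += 1
--         dictionary.update([(same_letters, i)])
--         same_letters = 0
--     return wordlist[dictionary[max(dictionary)]]
-- ===== SOURCE B (Python) =====
-- def find_same_word(word: str, wordlist: list):
--     best = wordlist[0]
--     best_score = -1
--     for w in wordlist: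
--         score = sum(a == b for a, b in zip(w, word))
--         if best_score <= score:
--             best, best_score = w, score
--     return best
-- ===== Notes on version B (the rewrite author's own statement) =====
-- stated objective: simpler
-- what changed: Replaced A's dict keyed by match-count plus a separate max-over-keys pass with a single running-best scan (>= keeps the last tied word, matching A's last-write-wins dict overwrite), computing each score with zip instead of index arithmetic.
import Mathlib
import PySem

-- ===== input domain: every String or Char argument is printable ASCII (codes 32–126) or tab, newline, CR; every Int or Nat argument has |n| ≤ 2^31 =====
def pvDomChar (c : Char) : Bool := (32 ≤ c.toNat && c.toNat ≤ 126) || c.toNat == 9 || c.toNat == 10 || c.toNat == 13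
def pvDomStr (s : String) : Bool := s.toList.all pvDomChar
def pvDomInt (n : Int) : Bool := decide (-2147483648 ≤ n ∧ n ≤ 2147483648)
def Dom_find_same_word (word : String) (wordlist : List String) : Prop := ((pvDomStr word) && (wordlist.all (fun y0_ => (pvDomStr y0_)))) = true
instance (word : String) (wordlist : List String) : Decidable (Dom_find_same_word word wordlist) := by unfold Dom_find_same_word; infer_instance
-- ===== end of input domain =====

-- B replaces A's count→index dict and max-over-keys pass by one running-best scan (simpler, same cost).

-- ===== PORT A =====
-- A's inner loop: count of positions letter < min(len(wi), len(word)) with equal characters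
def pvScoreA (word wi : String) : Int :=
  (PySem.List.pyRange 0 (min (PySem.Str.len wi) (PySem.Str.len word))).foldl
    (fun c letter =>
      if PySem.List.pyGetD wi.toList letter 'a' == PySem.List.pyGetD word.toList letter 'a'
      then c + 1 else c) 0
    -- indexing via pyGetD: letter is always in range here, so the default 'a' is never used

-- A's dict: for i in range(len(wordlist)): dictionary.update([(same_letters, i)])
def pvDictA (word : String) (wordlist : List String) : PySem.Dict Int Int :=
  (PySem.List.pyRange 0 (wordlist.length : Int)).foldl
    (fun d i => d.insert (pvScoreA word (PySem.List.pyGetD wordlist i "")) i) PySem.Dict.empty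

def find_same_word (word : String) (wordlist : List String) : String :=
  let d := pvDictA word wordlist
  -- max(dictionary) raises ValueError on an empty dict: Pre_ excludes wordlist = []
  PySem.List.pyGetD wordlist (d.getD ((PySem.List.max? d.keys (fun k => k)).getD 0) 0) ""

-- ===== PORT B =====
-- score = sum(a == b for a, b in zip(w, word))
def pvScoreB (word w : String) : Int :=
  ((w.toList.zip word.toList).map (fun p => if p.1 == p.2 then (1 : Int) else 0)).sum

def pvStepB (word : String) (b : String × Int) (w : String) : String × Int :=
  if b.2 ≤ pvScoreB word w then (w, pvScoreB word w) else b

def find_same_word_alt (word : String) (wordlist : List String) : String :=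
  -- best = wordlist[0] raises IndexError on []: Pre_ excludes wordlist = []
  (wordlist.foldl (pvStepB word) (PySem.List.pyGetD wordlist 0 "", -1)).1

-- ===== PRECONDITION & SPEC =====
-- A raises on the empty wordlist (max of an empty dict, ValueError); B raises there too (wordlist[0], IndexError).
def Pre_find_same_word (word : String) (wordlist : List String) : Prop := wordlist ≠ []
instance (word : String) (wordlist : List String) : Decidable (Pre_find_same_word word wordlist) := by unfold Pre_find_same_word; infer_instance
def pvWitness_find_same_word : String × List String := ("abc", ["abd", "xbc"])

def Spec_find_same_word (word : String) (wordlist : List String) (out : String) : Prop := out = find_same_word_alt word wordlist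
instance (word : String) (wordlist : List String) (out : String) : Decidable (Spec_find_same_word word wordlist out) := by unfold Spec_find_same_word; infer_instance

-- ===== CLAIM (what is proved, stated in full; the proofs are below) =====
def Claim_equal_find_same_word : Prop := ∀ (word : String) (wordlist : List String), Dom_find_same_word word wordlist → Pre_find_same_word word wordlist → Spec_find_same_word word wordlist (find_same_word word wordlist)

-- ===== LEMMAS AND PROOFS =====

-- the two score computations agree (both count the matching positions of the common prefix)
lemma countP_range_zip (xs ys : List Char) :
    (List.range (min xs.length ys.length)).countP
        (fun k => xs.getD k 'a' == ys.getD k 'a')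
      = (xs.zip ys).countP (fun p => p.1 == p.2) := by
  induction xs generalizing ys with
  | nil => simp
  | cons x xs ih =>
    cases ys with
    | nil => simp
    | cons y ys =>
      have : min (x :: xs).length (y :: ys).length = min xs.length ys.length + 1 := by
        simp [Nat.succ_min_succ]
      rw [this, List.range_succ_eq_map]
      simp only [List.countP_cons, List.countP_map, Function.comp_def, List.zip_cons_cons,
        List.getD_cons_zero, List.getD_cons_succ, ih ys]

lemma score_eq (word w : String) : pvScoreA word w = pvScoreB word w := by
  unfold pvScoreA pvScoreB
  rw [PySem.Str.len_eq, PySem.Str.len_eq, ← Nat.cast_min, PySem.List.pyRange_zero_natCast,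
      List.foldl_map,
      PySem.List.foldl_congr_mem _ _
        (fun c k => if w.toList.getD k 'a' == word.toList.getD k 'a' then c + 1 else c) _
        (by intro acc k _; rw [PySem.List.pyGetD_natCast, PySem.List.pyGetD_natCast]),
      PySem.List.foldl_if_add_one, PySem.List.sum_map_ite_one_zero, countP_range_zip]
  simp

lemma scoreB_nonneg (word w : String) : 0 ≤ pvScoreB word w := by
  unfold pvScoreB
  rw [PySem.List.sum_map_ite_one_zero]
  positivity

lemma dictA_snoc (word : String) (wl : List String) (w : String) :
    pvDictA word (wl ++ [w]) = (pvDictA word wl).insert (pvScoreA word w) (wl.length : Int) := by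
  unfold pvDictA
  have hlen : ((wl ++ [w]).length : Int) = ((wl.length + 1 : Nat) : Int) := by simp
  rw [hlen, PySem.List.pyRange_zero_natCast, List.range_succ, List.map_append,
      List.foldl_append, PySem.List.pyRange_zero_natCast]
  simp only [List.map_cons, List.map_nil, List.foldl_cons, List.foldl_nil]
  have hget : PySem.List.pyGetD (wl ++ [w]) (↑wl.length) "" = w := by
    rw [PySem.List.pyGetD_natCast, List.getD_append_right _ _ _ _ (le_refl _)]
    simp
  rw [hget]
  congr 1
  apply PySem.List.foldl_congr_mem
  intro acc i hi
  rw [List.mem_map] at hi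
  obtain ⟨k, hk, rfl⟩ := hi
  rw [List.mem_range] at hk
  rw [PySem.List.pyGetD_natCast, PySem.List.pyGetD_natCast, List.getD_append _ _ _ _ hk]

-- main invariant: after the fold, B's best pair (b.1, b.2) is such that b.2 is the maximum
-- dict key and A's dict maps b.2 to an index holding b.1
lemma main_inv (word : String) (wl : List String) (h : wl ≠ []) :
    (wl.foldl (pvStepB word) (PySem.List.pyGetD wl 0 "", -1)).2 ∈ (pvDictA word wl).keys ∧
    (∀ k ∈ (pvDictA word wl).keys, k ≤ (wl.foldl (pvStepB word) (PySem.List.pyGetD wl 0 "", -1)).2) ∧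
    ∃ j : Nat, j < wl.length ∧
      (pvDictA word wl).get? (wl.foldl (pvStepB word) (PySem.List.pyGetD wl 0 "", -1)).2 = some (j : Int) ∧
      wl.getD j "" = (wl.foldl (pvStepB word) (PySem.List.pyGetD wl 0 "", -1)).1 := by
  induction wl using List.reverseRecOn with
  | nil => exact absurd rfl h
  | append_singleton wl w ih =>
    by_cases hwl : wl = []
    · subst hwl
      have hs : pvStepB word (w, -1) w = (w, pvScoreB word w) := by
        unfold pvStepB
        rw [if_pos (le_trans (by norm_num) (scoreB_nonneg word w))]
      have hd : pvDictA word ([] ++ [w]) = PySem.Dict.empty.insert (pvScoreA word w) (0 : Int) := by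
        have := dictA_snoc word [] w
        simpa using this
      simp only [List.nil_append] at hd ⊢
      simp only [List.foldl_cons, List.foldl_nil] at *
      rw [show PySem.List.pyGetD [w] 0 "" = w from by rw [PySem.List.pyGetD_of_nonneg _ _ (le_refl 0)]; rfl]
      rw [hs, hd]
      refine ⟨?_, ?_, 0, by norm_num, ?_, by simp⟩
      · rw [PySem.Dict.mem_keys_insert]
        exact Or.inl (score_eq word w).symm
      · intro k hk
        rw [PySem.Dict.mem_keys_insert] at hk
        rcases hk with rfl | hk
        · exact le_of_eq (score_eq word w)
        · rw [PySem.Dict.keys_empty] at hk; cases hk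
      · rw [show pvScoreB word w = pvScoreA word w from (score_eq word w).symm,
            PySem.Dict.get?_insert_self]
        simp
    · -- inductive step: wl ≠ []
      obtain ⟨hmem, hmax, j, hj, hget, hval⟩ := ih hwl
      have h0 : PySem.List.pyGetD (wl ++ [w]) 0 "" = PySem.List.pyGetD wl 0 "" := by
        rw [show (0 : Int) = ((0 : Nat) : Int) from rfl, PySem.List.pyGetD_natCast,
            PySem.List.pyGetD_natCast, List.getD_append]
        exact List.length_pos_iff.mpr hwl
      set b := wl.foldl (pvStepB word) (PySem.List.pyGetD wl 0 "", -1) with hb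
      have hfold : (wl ++ [w]).foldl (pvStepB word) (PySem.List.pyGetD (wl ++ [w]) 0 "", -1)
          = pvStepB word b w := by
        rw [h0, List.foldl_append]; rfl
      rw [hfold, dictA_snoc]
      by_cases hc : b.2 ≤ pvScoreB word w
      · have hstep : pvStepB word b w = (w, pvScoreB word w) := by
          unfold pvStepB; rw [if_pos hc]
        rw [hstep]
        refine ⟨?_, ?_, wl.length, by simp, ?_, ?_⟩
        · rw [PySem.Dict.mem_keys_insert]; exact Or.inl (score_eq word w).symm
        · intro k hk
          rw [PySem.Dict.mem_keys_insert] at hk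
          rcases hk with rfl | hk
          · exact le_of_eq (score_eq word w)
          · exact le_trans (hmax k hk) hc
        · rw [show pvScoreB word w = pvScoreA word w from (score_eq word w).symm,
              PySem.Dict.get?_insert_self]
        · simp
      · have hstep : pvStepB word b w = b := by
          unfold pvStepB; rw [if_neg hc]
        rw [hstep]
        rw [not_le] at hc
        refine ⟨?_, ?_, j, by simp; omega, ?_, ?_⟩
        · rw [PySem.Dict.mem_keys_insert]; exact Or.inr hmem
        · intro k hk
          rw [PySem.Dict.mem_keys_insert] at hk
          rcases hk with rfl | hk
          · rw [score_eq]; exact le_of_lt hc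
          · exact hmax k hk
        · rw [PySem.Dict.get?_insert]
          rw [if_neg (by rw [← score_eq] at hc; exact fun he => absurd he.symm (ne_of_lt hc))]
          exact hget
        · rw [List.getD_append _ _ _ _ hj]; exact hval

-- ===== VERDICT (by name: the statement is the Claim_ definition above) =====
theorem find_same_word_spec : Claim_equal_find_same_word := by
  intro word wl _ hpre
  unfold Spec_find_same_word find_same_word
  show PySem.List.pyGetD wl ((pvDictA word wl).getD
    ((PySem.List.max? (pvDictA word wl).keys (fun k => k)).getD 0) 0) "" = _
  obtain ⟨hmem, hmax, j, hj, hget, hval⟩ := main_inv word wl hpre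
  set b := wl.foldl (pvStepB word) (PySem.List.pyGetD wl 0 "", -1) with hb
  have hkeys : (pvDictA word wl).keys ≠ [] := fun he => by rw [he] at hmem; cases hmem
  obtain ⟨m, hm⟩ : ∃ m, PySem.List.max? (pvDictA word wl).keys (fun k => k) = some m := by
    cases hmx : PySem.List.max? (pvDictA word wl).keys (fun k => k) with
    | none => exact absurd ((PySem.List.max?_eq_none_iff _ _).mp hmx) hkeys
    | some m => exact ⟨m, rfl⟩
  have hmeq : m = b.2 := by
    have h1 : m ≤ b.2 := hmax m (PySem.List.max?_mem hm)
    have h2 : b.2 ≤ m := PySem.List.max?_isMax hm b.2 hmem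
    omega
  rw [hm]
  simp only [Option.getD_some, hmeq]
  rw [PySem.Dict.getD_of_get?_eq_some _ _ hget, PySem.List.pyGetD_natCast, hval]
  unfold find_same_word_alt
  rfl
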